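-- pv_equiv track=rewrite | github.com/fazli1702/H2-Computing | LT 7 Tuples/Tutorial 7.py | odd_even_sums
-- ===== SOURCE A (Python) =====
-- def odd_even_sums(tup):
--     tup_even = ()
--     tup_odd = ()
--
--     sum_even = 0
--     sum_odd = 0
--
--     for i in range(0,len(tup),2):
--         tup_even += (tup[i],)
--         sum_even = sum(tup_even)
--         continue
--
--     for i in range(1,len(tup),2):
--         tup_odd += (tup[i],)
--         sum_odd = sum(tup_odd)
--         continue
--
--     return (sum_even, sum_odd)
-- ===== SOURCE B (Python) =====
-- def odd_even_sums(tup):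
--     # Single pass over the elements two at a time with running accumulators,
--     # instead of re-summing a growing tuple at every step.
--     se = 0
--     so = 0
--     i = 0
--     n = len(tup)
--     while i + 1 < n:
--         se += tup[i]
--         so += tup[i + 1]
--         i += 2
--     if i < n:
--         se += tup[i]
--     return (se, so)
-- ===== Notes on version B (the rewrite author's own statement) =====
-- stated objective: faster
-- what changed: B makes one pass over the list two elements at a time with running even/odd accumulators, instead of rebuilding two index-selected tuples and re-summing each growing tuple on every iteration.
import Mathlib
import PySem

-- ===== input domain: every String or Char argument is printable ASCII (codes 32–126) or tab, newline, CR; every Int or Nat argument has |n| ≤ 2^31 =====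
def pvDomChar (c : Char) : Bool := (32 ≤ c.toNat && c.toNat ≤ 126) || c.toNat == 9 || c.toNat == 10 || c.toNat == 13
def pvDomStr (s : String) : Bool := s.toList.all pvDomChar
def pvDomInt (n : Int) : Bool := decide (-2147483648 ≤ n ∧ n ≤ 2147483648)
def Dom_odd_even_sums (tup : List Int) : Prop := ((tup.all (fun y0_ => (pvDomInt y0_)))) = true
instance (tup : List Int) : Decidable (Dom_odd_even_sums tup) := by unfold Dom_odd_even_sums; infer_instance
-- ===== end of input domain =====

-- B replaces A's rebuild-and-resum of two index-selected tuples by one pairwise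
-- pass with running accumulators (objective: faster).

-- ===== PORT A =====
-- indices produced by pyRange are always in range here, so pyGetD's default 0 is never used
def odd_even_sums (tup : List Int) : List Int :=
  let stE :=
    (PySem.List.pyRange 0 (tup.length : Int) 2).foldl
      (fun (s : List Int × Int) i =>
        let te := s.1 ++ [PySem.List.pyGetD tup i 0]
        (te, te.foldl (· + ·) 0)) ([], 0)
  let stO :=
    (PySem.List.pyRange 1 (tup.length : Int) 2).foldl
      (fun (s : List Int × Int) i =>
        let tOdd := s.1 ++ [PySem.List.pyGetD tup i 0]
        (tOdd, tOdd.foldl (· + ·) 0)) ([], 0)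
  [stE.2, stO.2]

-- ===== PORT B =====
-- Source B's while-loop consumes two elements per step; ported as the tail recursion over the list
def oddEvenGo : List Int → Int → Int → Int × Int
  | a :: b :: rest, se, so => oddEvenGo rest (se + a) (so + b)
  | [a], se, so => (se + a, so)
  | [], se, so => (se, so)

def odd_even_sums_alt (tup : List Int) : List Int :=
  let p := oddEvenGo tup 0 0
  [p.1, p.2]

-- ===== PRECONDITION & SPEC =====
def Spec_odd_even_sums (tup : List Int) (out : List Int) : Prop := out = odd_even_sums_alt tup
instance (tup : List Int) (out : List Int) : Decidable (Spec_odd_even_sums tup out) := by unfold Spec_odd_even_sums; infer_instance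

-- ===== CLAIM (what is proved, stated in full; the proofs are below) =====
def Claim_equal_odd_even_sums : Prop := ∀ (tup : List Int), Dom_odd_even_sums tup → Spec_odd_even_sums tup (odd_even_sums tup)

-- ===== LEMMAS AND PROOFS =====

-- closed-form sums of even- and odd-indexed elements
def sumE : List Int → Int
  | [] => 0
  | [a] => a
  | a :: _ :: r => a + sumE r

def sumO : List Int → Int
  | [] => 0
  | [_] => 0
  | _ :: b :: r => b + sumO r

theorem oddEvenGo_eq (l : List Int) : ∀ se so, oddEvenGo l se so = (se + sumE l, so + sumO l) := by
  induction l using sumE.induct with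
  | case1 => intro se so; simp [oddEvenGo, sumE, sumO]
  | case2 a => intro se so; simp [oddEvenGo, sumE, sumO]
  | case3 a b r ih =>
      intro se so
      simp only [oddEvenGo, sumE, sumO, ih, Prod.mk.injEq]
      exact ⟨by ring, by ring⟩

-- A's fold state invariant: the running sum is recomputed from the collected list
theorem foldA_eq (g : Int → Int) (is : List Int) :
    ∀ acc : List Int,
      is.foldl (fun (s : List Int × Int) i =>
          let t := s.1 ++ [g i]
          (t, t.foldl (· + ·) 0)) (acc, acc.foldl (· + ·) 0)
        = (acc ++ is.map g, (acc ++ is.map g).foldl (· + ·) 0) := by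
  induction is with
  | nil => intro acc; simp
  | cons i is ih =>
      intro acc
      simp only [List.foldl_cons, List.map_cons]
      rw [ih (acc ++ [g i])]
      simp

theorem foldl_add_eq_sum (l : List Int) : l.foldl (· + ·) 0 = l.sum := by
  rw [List.sum_eq_foldl]

theorem pyRange_two_shift (a b : Int) :
    PySem.List.pyRange (a + 2) (b + 2) 2 = (PySem.List.pyRange a b 2).map (· + 2) := by
  rw [PySem.List.pyRange_of_pos a b (by norm_num),
      PySem.List.pyRange_of_pos (a + 2) (b + 2) (by norm_num)]
  have hcnt : (if a + 2 < b + 2 then ((b + 2 - (a + 2) + 2 - 1) / 2).toNat else 0)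
      = (if a < b then ((b - a + 2 - 1) / 2).toNat else 0) := by
    split_ifs <;> omega
  rw [hcnt, List.map_map]
  apply List.map_congr_left
  intro k _
  simp [Function.comp]; ring

theorem pyRange_two_cons (a b : Int) (h : a < b) :
    PySem.List.pyRange a b 2 = a :: (PySem.List.pyRange a (b - 2) 2).map (· + 2) := by
  have hshift := pyRange_two_shift a (b - 2)
  have hb : b - 2 + 2 = b := by ring
  rw [hb] at hshift
  rw [← hshift]
  rw [PySem.List.pyRange_of_pos a b (by norm_num),
      PySem.List.pyRange_of_pos (a + 2) b (by norm_num)]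
  have hc : (if a < b then ((b - a + 2 - 1) / 2).toNat else 0)
      = (if a + 2 < b then ((b - (a + 2) + 2 - 1) / 2).toNat else 0) + 1 := by
    split_ifs <;> omega
  rw [hc, List.range_succ_eq_map]
  simp only [List.map_cons, List.map_map]
  congr 1
  · simp
  · apply List.map_congr_left
    intro k _
    simp [Function.comp]
    ring

theorem pyGetD_cons_two (x y : Int) (r : List Int) (i : Int) (hi : 0 ≤ i) :
    PySem.List.pyGetD (x :: y :: r) (i + 2) 0 = PySem.List.pyGetD r i 0 := by
  rcases Int.eq_ofNat_of_zero_le hi with ⟨n, rfl⟩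
  have h2 : ((n : Int) + 2) = ((n + 2 : Nat) : Int) := by push_cast; ring
  rw [h2, PySem.List.pyGetD_natCast, PySem.List.pyGetD_natCast]
  simp [List.getD]

theorem mem_pyRange_two_nonneg {a b i : Int} (ha : 0 ≤ a)
    (h : i ∈ PySem.List.pyRange a b 2) : 0 ≤ i := by
  rcases (PySem.List.mem_pyRange_iff_of_pos (by norm_num : (0:Int) < 2) i).1 h with ⟨hle, _, _⟩
  omega

theorem mapTwo (x y : Int) (r : List Int) (a : Int) (ha : 0 ≤ a)
    (hab : a < (r.length : Int) + 2) :
    (PySem.List.pyRange a ((r.length : Int) + 2) 2).map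
        (fun i => PySem.List.pyGetD (x :: y :: r) i 0)
      = PySem.List.pyGetD (x :: y :: r) a 0 ::
        (PySem.List.pyRange a (r.length : Int) 2).map (fun i => PySem.List.pyGetD r i 0) := by
  rw [pyRange_two_cons a ((r.length : Int) + 2) hab]
  have hb : (r.length : Int) + 2 - 2 = (r.length : Int) := by ring
  rw [hb]
  simp only [List.map_cons, List.map_map]
  congr 1
  apply List.map_congr_left
  intro i hi
  have h0 : 0 ≤ i := mem_pyRange_two_nonneg ha hi
  simp [Function.comp]
  exact pyGetD_cons_two x y r i h0

theorem sumE_char (tup : List Int) :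
    ((PySem.List.pyRange 0 (tup.length : Int) 2).map
        (fun i => PySem.List.pyGetD tup i 0)).sum = sumE tup := by
  induction tup using sumE.induct with
  | case1 =>
      have h : PySem.List.pyRange 0 (0:Int) 2 = [] := by decide
      simp [h, sumE]
  | case2 a =>
      have h1 : (([a] : List Int).length : Int) = 1 := by simp
      have h2 : PySem.List.pyRange 0 (1:Int) 2 = [0] := by decide
      simp [h2, sumE, PySem.List.pyGetD_zero_cons]
  | case3 a b r ih =>
      have hlen : (((a :: b :: r) : List Int).length : Int) = (r.length : Int) + 2 := by
        simp; ring
      rw [hlen, mapTwo a b r 0 (by norm_num) (by omega)]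
      simp [PySem.List.pyGetD_zero_cons, sumE, ih]

theorem sumO_char (tup : List Int) :
    ((PySem.List.pyRange 1 (tup.length : Int) 2).map
        (fun i => PySem.List.pyGetD tup i 0)).sum = sumO tup := by
  induction tup using sumO.induct with
  | case1 =>
      have h : PySem.List.pyRange 1 (0:Int) 2 = [] := by decide
      simp [h, sumO]
  | case2 a =>
      have h1 : (([a] : List Int).length : Int) = 1 := by simp
      have h2 : PySem.List.pyRange 1 (1:Int) 2 = [] := by decide
      simp [h2, sumO]
  | case3 a b r ih =>
      have hlen : (((a :: b :: r) : List Int).length : Int) = (r.length : Int) + 2 := by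
        simp; ring
      have hone : PySem.List.pyGetD (a :: b :: r) 1 0 = b := by
        have : ((1:Nat) : Int) = (1 : Int) := by norm_num
        rw [← this, PySem.List.pyGetD_natCast]
        simp [List.getD]
      rw [hlen, mapTwo a b r 1 (by norm_num) (by omega)]
      simp [hone, sumO, ih]

-- ===== VERDICT (by name: the statement is the Claim_ definition above) =====
theorem odd_even_sums_spec : Claim_equal_odd_even_sums := by
  intro tup _
  unfold Spec_odd_even_sums odd_even_sums odd_even_sums_alt
  rw [oddEvenGo_eq]
  have hE := foldA_eq (fun i => PySem.List.pyGetD tup i 0)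
    (PySem.List.pyRange 0 (tup.length : Int) 2) []
  have hO := foldA_eq (fun i => PySem.List.pyGetD tup i 0)
    (PySem.List.pyRange 1 (tup.length : Int) 2) []
  simp only [List.nil_append, List.foldl_nil] at hE hO
  simp only [hE, hO]
  simp only [foldl_add_eq_sum, sumE_char, sumO_char]
  simp
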